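-- pv_equiv track=rewrite | github.com/SamiAbuTouq/GP | backend/whatif/run_scenario.py | _day_mask
-- ===== SOURCE A (Python) =====
-- from typing import Any, Dict, List, Optional
--
-- def _norm(s: Any) -> str:
--     return str(s or "").strip().lower()
--
-- def _day_mask(days: List[str]) -> int:
--     day_to_bit = {
--         "sunday": 0,
--         "monday": 1,
--         "tuesday": 2,
--         "wednesday": 3,
--         "thursday": 4,
--     }
--     mask = 0
--     for d in days or []:
--         bit = day_to_bit.get(_norm(d))
--         if bit is not None:
--             mask |= (1 << bit)
--     return mask
-- ===== SOURCE B (Python) =====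
-- from typing import Any, List
--
-- def _norm(s: Any) -> str:
--     return str(s or "").strip().lower()
--
-- def _day_mask(days: List[str]) -> int:
--     day_to_bit = {
--         "sunday": 0,
--         "monday": 1,
--         "tuesday": 2,
--         "wednesday": 3,
--         "thursday": 4,
--     }
--     present = {_norm(d) for d in (days or [])}
--     mask = 0
--     for name, bit in day_to_bit.items():
--         if name in present:
--             mask |= (1 << bit)
--     return mask
-- ===== Notes on version B (the rewrite author's own statement) =====
-- stated objective: alternative
-- what changed: B reverses the traversal: it builds the set of normalized input names in one pass, then loops over the fixed five-entry day table and ORs in each bit whose name is in that set, instead of looking every input day up in the dict.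
import Mathlib
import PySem

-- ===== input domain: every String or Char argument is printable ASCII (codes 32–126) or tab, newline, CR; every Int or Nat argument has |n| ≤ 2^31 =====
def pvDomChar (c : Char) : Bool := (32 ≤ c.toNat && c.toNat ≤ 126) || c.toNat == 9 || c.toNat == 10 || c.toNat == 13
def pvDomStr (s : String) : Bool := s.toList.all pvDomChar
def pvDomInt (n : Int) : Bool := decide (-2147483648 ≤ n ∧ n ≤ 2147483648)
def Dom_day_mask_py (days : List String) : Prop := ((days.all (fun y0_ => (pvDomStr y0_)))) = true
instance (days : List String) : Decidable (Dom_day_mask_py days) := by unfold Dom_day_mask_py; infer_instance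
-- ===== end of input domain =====

-- B reverses the traversal: it first builds the set of normalized input names in one pass,
-- then loops over the fixed day table (not over the input list), OR-ing each table bit
-- whose name is present.  Objective: alternative decomposition; same exact result.


-- ===== PORT A =====
-- _norm(s) for a string s: 's or ""' is s unless s is empty; str(·) is the identity on str
def pvNorm (s : String) : String :=
  PySem.Str.lower (PySem.Str.strip (if s = "" then "" else s))

def pvDayToBit : PySem.Dict String Int :=
  PySem.Dict.ofList
    [("sunday", 0), ("monday", 1), ("tuesday", 2), ("wednesday", 3), ("thursday", 4)]

-- body of A's loop: bit = day_to_bit.get(_norm(d)); if bit is not None: mask |= (1 << bit)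
-- (every value in the dict is a nonnegative literal, so '.toNat' on the shift amount is exact)
def pvStepA (mask : Int) (d : String) : Int :=
  match pvDayToBit.get? (pvNorm d) with
  | some bit => PySem.Int.bor mask (1 <<< bit.toNat)
  | none => mask

def day_mask_py (days : List String) : Int :=
  days.foldl pvStepA 0

-- ===== PORT B =====
def day_mask_py_alt (days : List String) : Int :=
  let present : PySem.Set String := PySem.Set.ofList (days.map pvNorm)
  pvDayToBit.items.foldl
    (fun mask nb =>
      if PySem.Set.contains present nb.1 then PySem.Int.bor mask (1 <<< nb.2.toNat) else mask)
    0

-- ===== PRECONDITION & SPEC =====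
def Spec_day_mask_py (days : List String) (out : Int) : Prop := out = day_mask_py_alt days
instance (days : List String) (out : Int) : Decidable (Spec_day_mask_py days out) := by unfold Spec_day_mask_py; infer_instance

-- ===== CLAIM (what is proved, stated in full; the proofs are below) =====
def Claim_equal_day_mask_py : Prop := ∀ (days : List String), Dom_day_mask_py days → Spec_day_mask_py days (day_mask_py days)

-- ===== LEMMAS AND PROOFS =====

-- is `name` among the normalized input days?
def pvCont (days : List String) (name : String) : Bool :=
  PySem.Set.contains (PySem.Set.ofList (List.map pvNorm days)) name

-- the mask (as a Nat) determined by which of the five table names are present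
def pvMaskN (b0 b1 b2 b3 b4 : Bool) : Nat :=
  (if b0 then 1 else 0) ||| (if b1 then 2 else 0) ||| (if b2 then 4 else 0) |||
    (if b3 then 8 else 0) ||| (if b4 then 16 else 0)

theorem pvCont_cons (d name : String) (days : List String) :
    pvCont (d :: days) name = (name == pvNorm d || pvCont days name) := by
  by_cases h : name = pvNorm d <;> simp [pvCont, pysem, h]

theorem pvBeqF (a b : String) (h : a ≠ b) : (a == b) = false := by simp [h]

theorem pvMaskN_or0 (b0 b1 b2 b3 b4 : Bool) :
    1 ||| pvMaskN b0 b1 b2 b3 b4 = pvMaskN true b1 b2 b3 b4 := by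
  cases b0 <;> cases b1 <;> cases b2 <;> cases b3 <;> cases b4 <;> decide
theorem pvMaskN_or1 (b0 b1 b2 b3 b4 : Bool) :
    2 ||| pvMaskN b0 b1 b2 b3 b4 = pvMaskN b0 true b2 b3 b4 := by
  cases b0 <;> cases b1 <;> cases b2 <;> cases b3 <;> cases b4 <;> decide
theorem pvMaskN_or2 (b0 b1 b2 b3 b4 : Bool) :
    4 ||| pvMaskN b0 b1 b2 b3 b4 = pvMaskN b0 b1 true b3 b4 := by
  cases b0 <;> cases b1 <;> cases b2 <;> cases b3 <;> cases b4 <;> decide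
theorem pvMaskN_or3 (b0 b1 b2 b3 b4 : Bool) :
    8 ||| pvMaskN b0 b1 b2 b3 b4 = pvMaskN b0 b1 b2 true b4 := by
  cases b0 <;> cases b1 <;> cases b2 <;> cases b3 <;> cases b4 <;> decide
theorem pvMaskN_or4 (b0 b1 b2 b3 b4 : Bool) :
    16 ||| pvMaskN b0 b1 b2 b3 b4 = pvMaskN b0 b1 b2 b3 true := by
  cases b0 <;> cases b1 <;> cases b2 <;> cases b3 <;> cases b4 <;> decide

-- B's loop over the five-entry table, written as pvMaskN of the five membership tests
theorem pvAltEq (days : List String) :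
    day_mask_py_alt days =
      ↑(pvMaskN (pvCont days "sunday") (pvCont days "monday") (pvCont days "tuesday")
          (pvCont days "wednesday") (pvCont days "thursday")) := by
  have hi : pvDayToBit.items =
      [("sunday", (0:Int)), ("monday", 1), ("tuesday", 2), ("wednesday", 3), ("thursday", 4)] := rfl
  simp only [day_mask_py_alt, hi, List.foldl_cons, List.foldl_nil, pvCont]
  generalize PySem.Set.contains (PySem.Set.ofList (List.map pvNorm days)) "sunday" = b0
  generalize PySem.Set.contains (PySem.Set.ofList (List.map pvNorm days)) "monday" = b1
  generalize PySem.Set.contains (PySem.Set.ofList (List.map pvNorm days)) "tuesday" = b2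
  generalize PySem.Set.contains (PySem.Set.ofList (List.map pvNorm days)) "wednesday" = b3
  generalize PySem.Set.contains (PySem.Set.ofList (List.map pvNorm days)) "thursday" = b4
  cases b0 <;> cases b1 <;> cases b2 <;> cases b3 <;> cases b4 <;> decide

-- A's loop, run from any accumulator ↑m, ORs in exactly the bits of the present table names
theorem pvKey (days : List String) (m : Nat) :
    days.foldl pvStepA (↑m) =
      PySem.Int.bor (↑m)
        (↑(pvMaskN (pvCont days "sunday") (pvCont days "monday") (pvCont days "tuesday")
            (pvCont days "wednesday") (pvCont days "thursday"))) := by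
  induction days generalizing m with
  | nil =>
      rw [show pvMaskN (pvCont [] "sunday") (pvCont [] "monday") (pvCont [] "tuesday")
            (pvCont [] "wednesday") (pvCont [] "thursday") = 0 from rfl,
        Nat.cast_zero, PySem.Int.bor_zero, List.foldl_nil]
  | cons d days ih =>
      by_cases h0 : pvNorm d = "sunday"
      · have hs : pvStepA (↑m) d = PySem.Int.bor ↑m ((1:Nat):Int) := by
          unfold pvStepA; rw [h0]; rfl
        rw [List.foldl_cons, hs, PySem.Int.bor_natCast, ih]
        simp only [pvCont_cons, h0, beq_self_eq_true, Bool.true_or,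
          pvBeqF "monday" "sunday" (by decide), pvBeqF "tuesday" "sunday" (by decide),
          pvBeqF "wednesday" "sunday" (by decide), pvBeqF "thursday" "sunday" (by decide),
          Bool.false_or]
        rw [PySem.Int.bor_natCast, PySem.Int.bor_natCast, Nat.or_assoc, pvMaskN_or0]
      by_cases h1 : pvNorm d = "monday"
      · have hs : pvStepA (↑m) d = PySem.Int.bor ↑m ((2:Nat):Int) := by
          unfold pvStepA; rw [h1]; rfl
        rw [List.foldl_cons, hs, PySem.Int.bor_natCast, ih]
        simp only [pvCont_cons, h1, beq_self_eq_true, Bool.true_or,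
          pvBeqF "sunday" "monday" (by decide), pvBeqF "tuesday" "monday" (by decide),
          pvBeqF "wednesday" "monday" (by decide), pvBeqF "thursday" "monday" (by decide),
          Bool.false_or]
        rw [PySem.Int.bor_natCast, PySem.Int.bor_natCast, Nat.or_assoc, pvMaskN_or1]
      by_cases h2 : pvNorm d = "tuesday"
      · have hs : pvStepA (↑m) d = PySem.Int.bor ↑m ((4:Nat):Int) := by
          unfold pvStepA; rw [h2]; rfl
        rw [List.foldl_cons, hs, PySem.Int.bor_natCast, ih]
        simp only [pvCont_cons, h2, beq_self_eq_true, Bool.true_or,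
          pvBeqF "sunday" "tuesday" (by decide), pvBeqF "monday" "tuesday" (by decide),
          pvBeqF "wednesday" "tuesday" (by decide), pvBeqF "thursday" "tuesday" (by decide),
          Bool.false_or]
        rw [PySem.Int.bor_natCast, PySem.Int.bor_natCast, Nat.or_assoc, pvMaskN_or2]
      by_cases h3 : pvNorm d = "wednesday"
      · have hs : pvStepA (↑m) d = PySem.Int.bor ↑m ((8:Nat):Int) := by
          unfold pvStepA; rw [h3]; rfl
        rw [List.foldl_cons, hs, PySem.Int.bor_natCast, ih]
        simp only [pvCont_cons, h3, beq_self_eq_true, Bool.true_or,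
          pvBeqF "sunday" "wednesday" (by decide), pvBeqF "monday" "wednesday" (by decide),
          pvBeqF "tuesday" "wednesday" (by decide), pvBeqF "thursday" "wednesday" (by decide),
          Bool.false_or]
        rw [PySem.Int.bor_natCast, PySem.Int.bor_natCast, Nat.or_assoc, pvMaskN_or3]
      by_cases h4 : pvNorm d = "thursday"
      · have hs : pvStepA (↑m) d = PySem.Int.bor ↑m ((16:Nat):Int) := by
          unfold pvStepA; rw [h4]; rfl
        rw [List.foldl_cons, hs, PySem.Int.bor_natCast, ih]
        simp only [pvCont_cons, h4, beq_self_eq_true, Bool.true_or,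
          pvBeqF "sunday" "thursday" (by decide), pvBeqF "monday" "thursday" (by decide),
          pvBeqF "tuesday" "thursday" (by decide), pvBeqF "wednesday" "thursday" (by decide),
          Bool.false_or]
        rw [PySem.Int.bor_natCast, PySem.Int.bor_natCast, Nat.or_assoc, pvMaskN_or4]
      · have hg : pvDayToBit.get? (pvNorm d) = none := by
          simp [show pvDayToBit = PySem.Dict.mk
              [("sunday",(0:Int)),("monday",1),("tuesday",2),("wednesday",3),("thursday",4)] from rfl,
            PySem.Dict.get?, beq_iff_eq,
            Ne.symm h0, Ne.symm h1, Ne.symm h2, Ne.symm h3, Ne.symm h4]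
        have hs : pvStepA (↑m) d = ↑m := by unfold pvStepA; rw [hg]
        rw [List.foldl_cons, hs, ih]
        simp only [pvCont_cons,
          pvBeqF "sunday" (pvNorm d) (Ne.symm h0), pvBeqF "monday" (pvNorm d) (Ne.symm h1),
          pvBeqF "tuesday" (pvNorm d) (Ne.symm h2), pvBeqF "wednesday" (pvNorm d) (Ne.symm h3),
          pvBeqF "thursday" (pvNorm d) (Ne.symm h4), Bool.false_or]

-- ===== VERDICT (by name: the statement is the Claim_ definition above) =====
theorem day_mask_py_spec : Claim_equal_day_mask_py := by
  intro days _
  unfold Spec_day_mask_py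
  rw [pvAltEq, show day_mask_py days = days.foldl pvStepA ((0:Nat):Int) from rfl, pvKey,
    PySem.Int.bor_comm, Nat.cast_zero, PySem.Int.bor_zero]
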